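-- pv_equiv track=rewrite | github.com/Deltares/hydromt_delwaq | hydromt_delwaq/workflows/segments.py | sfwcomp
-- ===== SOURCE A (Python) =====
-- def sfwcomp(compartments: list, config: dict):
--     """Finds and return surface water compartment based on B3_attributes config"""
--     nl = 7
--     sfw = None
--     attributes = config.get("B3_attributes")
--     for i in range(len(compartments)):
--         cp = attributes.get(
--             f"l{nl}",
--             "     1*01 ; sfw",
--         )
--         issfw = cp.split("*")[1][0:2]
--         if int(issfw) == 1:
--             sfw = cp.split(";")[1][1:]
--         nl += 1
--
--     return sfw
-- ===== SOURCE B (Python) =====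
-- def _entry(attributes, nl):
--     return attributes.get(f"l{nl}", "     1*01 ; sfw")
--
--
-- def _is_sfw(cp):
--     return int(cp.split("*")[1][0:2]) == 1
--
--
-- def _label(cp):
--     return cp.split(";")[1][1:]
--
--
-- def sfwcomp(compartments: list, config: dict):
--     """Finds and return surface water compartment based on B3_attributes config"""
--     attributes = config.get("B3_attributes")
--     for i in range(len(compartments) - 1, -1, -1):
--         cp = _entry(attributes, 7 + i)
--         if _is_sfw(cp):
--             return _label(cp)
--     return None
-- ===== Notes on version B (the rewrite author's own statement) =====
-- stated objective: alternative
-- what changed: Replaces the forward scan that remembers the last surface-water match (and an explicit nl counter) with a backward scan over the indices that returns the first match immediately, with the attribute lookup/flag/label parsing factored into helpers; equal results since last-in-forward = first-in-reverse.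
import Mathlib
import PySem

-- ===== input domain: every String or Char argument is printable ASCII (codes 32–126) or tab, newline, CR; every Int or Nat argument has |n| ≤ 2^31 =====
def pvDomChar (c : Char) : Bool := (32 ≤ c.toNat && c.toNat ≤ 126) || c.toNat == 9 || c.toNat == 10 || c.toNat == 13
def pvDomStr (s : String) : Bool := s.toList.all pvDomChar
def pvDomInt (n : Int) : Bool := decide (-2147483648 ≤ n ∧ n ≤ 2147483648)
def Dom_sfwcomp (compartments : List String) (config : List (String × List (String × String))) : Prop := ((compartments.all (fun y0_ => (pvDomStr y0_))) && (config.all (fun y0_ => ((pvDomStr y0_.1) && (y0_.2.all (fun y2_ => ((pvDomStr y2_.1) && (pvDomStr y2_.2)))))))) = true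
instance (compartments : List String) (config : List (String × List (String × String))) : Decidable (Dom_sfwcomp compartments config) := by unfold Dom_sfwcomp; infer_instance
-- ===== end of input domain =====

-- B replaces A's forward scan-and-remember-last (with an explicit nl counter) by a backward
-- scan over the indices that returns the first match, with the parsing factored into helpers;
-- same result, since the last forward match is the first backward match.


-- ===== PORT A =====
-- loop body of A: state is (nl, sfw); cp/issfw/label exactly as in the Python
def pvStepA (attrs : List (String × String)) (st : Int × Option String) (_i : Int) : Int × Option String :=
  let cp := (PySem.Dict.mk attrs).getD ("l" ++ PySem.Int.toStr st.1) "     1*01 ; sfw"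
  let issfw := PySem.Str.slice (PySem.List.pyGetD ((PySem.Str.split? cp "*").getD []) 1 "") (some 0) (some 2)
  let sfw := if (PySem.Int.ofStr? issfw).getD 0 == 1 then
      some (PySem.Str.slice (PySem.List.pyGetD ((PySem.Str.split? cp ";").getD []) 1 "") (some 1) none)
    else st.2
  (st.1 + 1, sfw)

def sfwcomp (compartments : List String) (config : List (String × List (String × String))) : Option String :=
  let attributes := ((PySem.Dict.mk config).get? "B3_attributes").getD []
  ((PySem.List.pyRange 0 (compartments.length : Int) 1).foldl (pvStepA attributes) (7, none)).2

-- ===== PORT B =====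
def pvEntry (attributes : List (String × String)) (nl : Int) : String :=
  (PySem.Dict.mk attributes).getD ("l" ++ PySem.Int.toStr nl) "     1*01 ; sfw"

def pvIsSfw (cp : String) : Bool :=
  (PySem.Int.ofStr? (PySem.Str.slice (PySem.List.pyGetD ((PySem.Str.split? cp "*").getD []) 1 "") (some 0) (some 2))).getD 0 == 1

def pvLabel (cp : String) : String :=
  PySem.Str.slice (PySem.List.pyGetD ((PySem.Str.split? cp ";").getD []) 1 "") (some 1) none

-- the backward for-loop with early return, as recursion over range(len-1, -1, -1)
def pvScanRev (attributes : List (String × String)) : List Int → Option String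
  | [] => none
  | i :: rest =>
      let cp := pvEntry attributes (7 + i)
      if pvIsSfw cp then some (pvLabel cp) else pvScanRev attributes rest

def sfwcomp_alt (compartments : List String) (config : List (String × List (String × String))) : Option String :=
  let attributes := ((PySem.Dict.mk config).get? "B3_attributes").getD []
  pvScanRev attributes (PySem.List.pyRange ((compartments.length : Int) - 1) (-1) (-1))

-- ===== PRECONDITION & SPEC =====
-- Pre_ excludes exactly the inputs where the Python A raises: a nonempty compartment list with
-- the "B3_attributes" key missing (AttributeError on None.get), or some scanned attribute entry
-- whose text has no "*" (IndexError), whose flag does not parse as an int (ValueError), or a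
-- matching entry with no ";" (IndexError).
def Pre_sfwcomp (compartments : List String) (config : List (String × List (String × String))) : Prop :=
  compartments = [] ∨
  ((PySem.Dict.mk config).contains "B3_attributes" = true ∧
   ∀ nl ∈ PySem.List.pyRange 7 (7 + (compartments.length : Int)) 1,
     let cp := (PySem.Dict.mk (((PySem.Dict.mk config).get? "B3_attributes").getD [])).getD
       ("l" ++ PySem.Int.toStr nl) "     1*01 ; sfw"
     2 ≤ ((PySem.Str.split? cp "*").getD []).length ∧
     (PySem.Int.ofStr? (PySem.Str.slice (PySem.List.pyGetD ((PySem.Str.split? cp "*").getD []) 1 "") (some 0) (some 2))).isSome = true ∧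
     ((PySem.Int.ofStr? (PySem.Str.slice (PySem.List.pyGetD ((PySem.Str.split? cp "*").getD []) 1 "") (some 0) (some 2))).getD 0 = 1 →
       2 ≤ ((PySem.Str.split? cp ";").getD []).length))

instance (compartments : List String) (config : List (String × List (String × String))) : Decidable (Pre_sfwcomp compartments config) := by unfold Pre_sfwcomp; infer_instance

def pvWitness_sfwcomp : List String × (List (String × List (String × String))) :=
  (["Water"], [("B3_attributes", [("l7", "     1*01 ; sfw")])])

def Spec_sfwcomp (compartments : List String) (config : List (String × List (String × String))) (out : Option String) : Prop := out = sfwcomp_alt compartments config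
instance (compartments : List String) (config : List (String × List (String × String))) (out : Option String) : Decidable (Spec_sfwcomp compartments config out) := by unfold Spec_sfwcomp; infer_instance

-- ===== CLAIM (what is proved, stated in full; the proofs are below) =====
def Claim_equal_sfwcomp : Prop := ∀ (compartments : List String) (config : List (String × List (String × String))), Dom_sfwcomp compartments config → Pre_sfwcomp compartments config → Spec_sfwcomp compartments config (sfwcomp compartments config)

-- ===== LEMMAS AND PROOFS =====

-- the A-fold over range(0,n) from (7, none) ends at nl = 7+n with the last match,
-- which is what the reverse scan over range(n-1, -1, -1) returns first
lemma foldA_eq_scanRev (attrs : List (String × String)) (n : Nat) :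
    (PySem.List.pyRange 0 (n : Int) 1).foldl (pvStepA attrs) (7, none) =
      (7 + (n : Int), pvScanRev attrs (PySem.List.pyRange ((n : Int) - 1) (-1) (-1))) := by
  induction n with
  | zero =>
      rw [PySem.List.pyRange_one_eq_nil (by omega), PySem.List.pyRange_neg_one_eq_nil (by omega)]
      rfl
  | succ n ih =>
      have hcast : ((n + 1 : Nat) : Int) = (n : Int) + 1 := by push_cast; ring
      rw [hcast]
      rw [PySem.List.pyRange_one_succ_right (by omega)]
      rw [List.foldl_append, ih]
      rw [show (n : Int) + 1 - 1 = (n : Int) by ring]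
      rw [PySem.List.pyRange_neg_one_cons (show (-1 : Int) < (n : Int) by omega)]
      rw [List.foldl_cons, List.foldl_nil]
      refine Prod.ext ?_ ?_
      · show 7 + (n : Int) + 1 = 7 + ((n : Int) + 1)
        ring
      · rfl

theorem sfwcomp_spec : Claim_equal_sfwcomp := by
  intro compartments config _hdom _hpre
  show sfwcomp compartments config = sfwcomp_alt compartments config
  show ((PySem.List.pyRange 0 (compartments.length : Int) 1).foldl
      (pvStepA (((PySem.Dict.mk config).get? "B3_attributes").getD [])) (7, none)).2 =
    pvScanRev (((PySem.Dict.mk config).get? "B3_attributes").getD [])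
      (PySem.List.pyRange ((compartments.length : Int) - 1) (-1) (-1))
  rw [foldA_eq_scanRev]
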